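-- pv_equiv track=rewrite | github.com/speedfinger/codingtest_python_2nd | 8_hash/19.py | solution
-- ===== SOURCE A (Python) =====
-- def polynomial_hash(str):
--   p = 31  # 소수
--   m = 1_000_000_007  # 버킷 크기
--   hash_value = 0
--   for char in str:
--     hash_value = (hash_value * p + ord(char)) % m
--   return hash_value
--
-- def solution(str_list,query_list):
--
--     hash_list = [polynomial_hash(str) for str in str_list]
--
--     answer = []
--     for query in query_list:
--         hash_key = polynomial_hash(query)
--         if hash_key in hash_list:
--             answer.append(True)
--         else:
--             answer.append(False)
--
--
--     return answer
-- ===== SOURCE B (Python) =====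
-- def polynomial_hash(str):
--   p = 31  # prime
--   m = 1_000_000_007  # bucket size
--   hash_value = 0
--   for char in str:
--     hash_value = (hash_value * p + ord(char)) % m
--   return hash_value
--
--
-- def _bisect_left(a, x):
--     # standard bisect_left (A imports nothing, so we cannot import bisect)
--     lo, hi = 0, len(a)
--     while lo < hi:
--         mid = (lo + hi) // 2
--         if a[mid] < x:
--             lo = mid + 1
--         else:
--             hi = mid
--     return lo
--
--
-- def solution(str_list, query_list):
--     sorted_hashes = sorted(polynomial_hash(s) for s in str_list)
--
--     def present(h):
--         i = _bisect_left(sorted_hashes, h)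
--         return i < len(sorted_hashes) and sorted_hashes[i] == h
--
--     return [present(polynomial_hash(q)) for q in query_list]
-- ===== Notes on version B (the rewrite author's own statement) =====
-- stated objective: faster
-- what changed: B sorts the source hashes once and answers each query by binary search (hand-written bisect_left) instead of a linear membership scan of the hash list per query.
import Mathlib
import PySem

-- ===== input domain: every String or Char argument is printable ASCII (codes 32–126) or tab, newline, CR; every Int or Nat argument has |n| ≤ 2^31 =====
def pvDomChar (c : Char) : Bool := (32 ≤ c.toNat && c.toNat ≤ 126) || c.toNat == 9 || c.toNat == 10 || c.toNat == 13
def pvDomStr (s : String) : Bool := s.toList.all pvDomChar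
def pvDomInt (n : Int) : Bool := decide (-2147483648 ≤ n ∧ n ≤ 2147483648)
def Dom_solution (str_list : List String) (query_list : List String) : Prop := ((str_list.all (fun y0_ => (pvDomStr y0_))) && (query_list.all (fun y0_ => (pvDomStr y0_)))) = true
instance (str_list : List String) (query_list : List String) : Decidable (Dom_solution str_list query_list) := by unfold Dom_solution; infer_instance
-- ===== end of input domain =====

-- ===== PORT A =====
-- B replaces A's per-query linear membership scan with a sort-once-then-binary-search index (objective: faster).
-- polynomial_hash: literal port of the helper (hash_value = (hash_value * 31 + ord(char)) % 1_000_000_007 over the chars)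
def polynomial_hash (s : String) : Int :=
  s.toList.foldl (fun hash_value char =>
    PySem.Int.mod (hash_value * 31 + (char.toNat : Int)) 1000000007) 0

def solution (str_list : List String) (query_list : List String) : List Bool :=
  let hash_list := str_list.map (fun str => polynomial_hash str)
  query_list.foldl (fun answer query =>
    let hash_key := polynomial_hash query
    if hash_list.contains hash_key then answer ++ [true] else answer ++ [false]) []

-- ===== PORT B =====
-- Source B's hand-written _bisect_left is exactly the lo/hi halving loop PySem.List.bisectLeft implements,
-- so it is ported as that primitive (and sorted(...) as PySem.List.sorted).
def solution_alt (str_list : List String) (query_list : List String) : List Bool :=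
  let sorted_hashes := PySem.List.sorted (str_list.map (fun s => polynomial_hash s)) (fun x => x) false
  query_list.map (fun q =>
    let h := polynomial_hash q
    let i := PySem.List.bisectLeft sorted_hashes h
    decide (i < sorted_hashes.length) && (sorted_hashes.getD i 0 == h))

-- ===== PRECONDITION & SPEC =====
def Spec_solution (str_list : List String) (query_list : List String) (out : List Bool) : Prop := out = solution_alt str_list query_list
instance (str_list : List String) (query_list : List String) (out : List Bool) : Decidable (Spec_solution str_list query_list out) := by unfold Spec_solution; infer_instance

-- ===== CLAIM (what is proved, stated in full; the proofs are below) =====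
def Claim_equal_solution : Prop := ∀ (str_list : List String) (query_list : List String), Dom_solution str_list query_list → Spec_solution str_list query_list (solution str_list query_list)

-- ===== LEMMAS AND PROOFS =====

-- B's per-query test on the sorted hash list decides exactly membership in the hash list.
theorem present_eq_contains (hs : List Int) (h : Int) :
    (let s := PySem.List.sorted hs (fun x => x) false
     let i := PySem.List.bisectLeft s h
     decide (i < s.length) && (s.getD i 0 == h)) = hs.contains h := by
  simp only []
  set s := PySem.List.sorted hs (fun x => x) false with hsdef
  have hpair : s.Pairwise (fun a b => a ≤ b) := by
    simpa using PySem.List.sorted_pairwise hs (fun x => x)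
  obtain ⟨hle, hlt, hge⟩ := PySem.List.bisectLeft_spec s h hpair
  set i := PySem.List.bisectLeft s h with hidef
  have hmem : h ∈ s ↔ h ∈ hs := PySem.List.mem_sorted hs (fun x => x) false h
  rw [Bool.eq_iff_iff]
  simp only [Bool.and_eq_true, decide_eq_true_eq, beq_iff_eq, List.contains_iff_mem]
  rw [← hmem]
  constructor
  · rintro ⟨hilen, hv⟩
    rw [List.getD_eq_getElem s 0 hilen] at hv
    exact hv ▸ List.getElem_mem hilen
  · intro hin
    obtain ⟨j, hj, hjv⟩ := List.mem_iff_getElem.mp hin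
    have hij : i ≤ j := by
      by_contra hlt'
      exact absurd hjv (ne_of_lt (hlt j hj (by omega)))
    have hilen : i < s.length := lt_of_le_of_lt hij hj
    refine ⟨hilen, ?_⟩
    rw [List.getD_eq_getElem s 0 hilen]
    have h1 : h ≤ s[i] := hge i hilen le_rfl
    have h2 : s[i] ≤ s[j] := PySem.List.sorted_id_getElem_mono hs hij hj
    omega

-- ===== VERDICT (by name: the statement is the Claim_ definition above) =====
theorem solution_spec : Claim_equal_solution := by
  intro str_list query_list _
  unfold Spec_solution solution solution_alt
  simp only []
  rw [show (fun (answer : List Bool) query =>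
        let hash_key := polynomial_hash query
        if (str_list.map (fun str => polynomial_hash str)).contains hash_key then answer ++ [true]
        else answer ++ [false])
      = (fun answer query => answer ++
          [(str_list.map (fun str => polynomial_hash str)).contains (polynomial_hash query)]) from by
    funext answer query
    cases hc : (str_list.map (fun str => polynomial_hash str)).contains (polynomial_hash query) <;>
      simp only [hc] <;> simp]
  rw [PySem.List.foldl_append_singleton_eq_map]
  exact List.map_congr_left (fun q _ => (present_eq_contains _ (polynomial_hash q)).symm)
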